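-- pv_equiv track=rewrite | github.com/mayflower/mayflower_sandbox | src/mayflower_sandbox/integrations.py | _matches_allowlist
-- ===== SOURCE A (Python) =====
-- def _matches_allowlist(value: str, allowlist: list[str]) -> bool:
--     lowered = value.lower()
--     for token in allowlist:
--         if lowered == token:
--             return True
--         if lowered.endswith(f".{token}"):
--             return True
--     return False
-- ===== SOURCE B (Python) =====
-- def _matches_allowlist(value: str, allowlist: list[str]) -> bool:
--     lowered = value.lower()
--     tokens = set(allowlist)
--     candidates = [lowered] + [lowered[i + 1:] for i, ch in enumerate(lowered) if ch == "."]
--     return any(c in tokens for c in candidates)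
-- ===== Notes on version B (the rewrite author's own statement) =====
-- stated objective: alternative
-- what changed: B builds a set of the allowlist once and enumerates the dot-delimited suffixes of the lowered value (full string plus the substring after each '.'), testing each with a set lookup, instead of scanning the allowlist and calling endswith per token.
import Mathlib
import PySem

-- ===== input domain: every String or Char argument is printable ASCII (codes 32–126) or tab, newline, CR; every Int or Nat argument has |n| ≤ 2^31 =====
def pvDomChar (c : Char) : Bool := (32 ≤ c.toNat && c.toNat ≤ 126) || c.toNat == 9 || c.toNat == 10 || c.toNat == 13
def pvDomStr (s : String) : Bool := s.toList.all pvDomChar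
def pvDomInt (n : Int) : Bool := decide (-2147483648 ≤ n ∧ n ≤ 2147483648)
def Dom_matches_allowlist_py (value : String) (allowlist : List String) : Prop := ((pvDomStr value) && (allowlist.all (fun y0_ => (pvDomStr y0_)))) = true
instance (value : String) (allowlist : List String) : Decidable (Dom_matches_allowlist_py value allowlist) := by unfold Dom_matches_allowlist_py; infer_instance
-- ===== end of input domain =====

-- B replaces the per-token endswith scan of the allowlist by a one-time set of the
-- allowlist plus an enumeration of the dot-delimited suffixes of the lowered value.

-- ===== PORT A =====
-- the 'for token in allowlist' loop with its two early returns
def pvLoopA (lowered : String) : List String → Bool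
  | [] => false
  | token :: rest =>
      if lowered == token then true
      else if PySem.Str.endswith lowered ("." ++ token) then true
      else pvLoopA lowered rest

def matches_allowlist_py (value : String) (allowlist : List String) : Bool :=
  let lowered := PySem.Str.lower value
  pvLoopA lowered allowlist

-- ===== PORT B =====
-- the comprehension [lowered[i+1:] for i, ch in enumerate(lowered) if ch == '.'] on the char list
def pvDotSuffixes : List Char → List (List Char)
  | [] => []
  | c :: cs => if c = '.' then cs :: pvDotSuffixes cs else pvDotSuffixes cs

def matches_allowlist_py_alt (value : String) (allowlist : List String) : Bool :=
  let lowered := PySem.Str.lower value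
  let tokens : PySem.Set String := PySem.Set.ofList allowlist
  let candidates := lowered :: (pvDotSuffixes lowered.toList).map String.ofList
  candidates.any (fun c => PySem.Set.contains tokens c)

-- ===== PRECONDITION & SPEC =====
def Spec_matches_allowlist_py (value : String) (allowlist : List String) (out : Bool) : Prop := out = matches_allowlist_py_alt value allowlist
instance (value : String) (allowlist : List String) (out : Bool) : Decidable (Spec_matches_allowlist_py value allowlist out) := by unfold Spec_matches_allowlist_py; infer_instance

-- ===== CLAIM (what is proved, stated in full; the proofs are below) =====
def Claim_equal_matches_allowlist_py : Prop := ∀ (value : String) (allowlist : List String), Dom_matches_allowlist_py value allowlist → Spec_matches_allowlist_py value allowlist (matches_allowlist_py value allowlist)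

-- ===== LEMMAS AND PROOFS =====

-- A's loop is an existential scan over the allowlist
theorem pvLoopA_eq_true_iff (lowered : String) (ts : List String) :
    pvLoopA lowered ts = true ↔
      ∃ t ∈ ts, lowered = t ∨ PySem.Str.endswith lowered ("." ++ t) = true := by
  induction ts with
  | nil => simp [pvLoopA]
  | cons t rest ih =>
      simp only [pvLoopA]
      split_ifs with h1 h2
      · simp_all
      · simp_all
      · simp only [ih, List.mem_cons]
        constructor
        · rintro ⟨u, hu, h⟩; exact ⟨u, Or.inr hu, h⟩
        · rintro ⟨u, hu | hu, h⟩
          · subst hu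
            have h1' : lowered ≠ u := by simpa using h1
            rcases h with h | h
            · exact absurd h h1'
            · exact absurd h h2
          · exact ⟨u, hu, h⟩

-- '.'-prefixed suffix characterisation: lowered ends with "." ++ t iff t.toList is a dot suffix
theorem mem_pvDotSuffixes_iff (t l : List Char) :
    t ∈ pvDotSuffixes l ↔ ('.' :: t) <:+ l := by
  induction l with
  | nil => simp [pvDotSuffixes]
  | cons c cs ih =>
      simp only [pvDotSuffixes, List.suffix_cons_iff]
      split_ifs with h
      · subst h
        simp only [List.mem_cons, ih]
        constructor
        · rintro (rfl | h)
          · exact Or.inl rfl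
          · exact Or.inr h
        · rintro (h | h)
          · exact Or.inl ((List.cons.injEq _ _ _ _).mp h).2
          · exact Or.inr h
      · rw [ih]
        constructor
        · exact Or.inr
        · rintro (hh | hh)
          · exact absurd ((List.cons.injEq _ _ _ _).mp hh).1.symm h
          · exact hh

-- ===== VERDICT (by name: the statement is the Claim_ definition above) =====
theorem matches_allowlist_py_spec : Claim_equal_matches_allowlist_py := by
  intro value allowlist _
  unfold Spec_matches_allowlist_py
  unfold matches_allowlist_py matches_allowlist_py_alt
  simp only []
  set lowered := PySem.Str.lower value with hl
  rw [Bool.eq_iff_iff, pvLoopA_eq_true_iff]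
  simp only [List.any_cons, List.any_map, Bool.or_eq_true, List.any_eq_true,
    Function.comp, PySem.Set.contains_iff, PySem.Set.mem_ofList]
  constructor
  · rintro ⟨t, ht, rfl | h⟩
    · exact Or.inl ht
    · refine Or.inr ⟨t.toList, ?_, ?_⟩
      · rw [mem_pvDotSuffixes_iff]
        have := (PySem.Chars.endswith_iff lowered.toList ("." ++ t).toList).mp (by
          simpa using h)
        simpa using this
      · simpa using ht
  · rintro (h | ⟨s, hs, hmem⟩)
    · exact ⟨lowered, h, Or.inl rfl⟩
    · refine ⟨String.ofList s, hmem, Or.inr ?_⟩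
      rw [mem_pvDotSuffixes_iff] at hs
      have : PySem.Chars.endswith lowered.toList ("." ++ String.ofList s).toList = true := by
        rw [PySem.Chars.endswith_iff]; simpa [String.toList_ofList] using hs
      simpa using this
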